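-- pv_equiv track=rewrite | github.com/uiansol/Algorithms | Leetcode/Algorithms/Easy/Image Smoother/Image Smoother_1.py | average3x3
-- ===== SOURCE A (Python) =====
-- from typing import List
--
-- def average3x3(i: int, j: int, img: List[List[int]]) -> int:
--     add, count = 0, 0
--
--     for a in range(i - 1, i + 2):
--         for b in range(j - 1, j + 2):
--             if (a >= 0 and a < len(img)) and (b >= 0 and b < len(img[0])):
--                 add += img[a][b]
--                 count += 1
--
--     return add // count
-- ===== SOURCE B (Python) =====
-- from typing import List
--
-- def average3x3(i: int, j: int, img: List[List[int]]) -> int: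
--     h = len(img)
--     w = len(img[0]) if img else 0
--     # Integral image: P[a][b] = sum of img[r][c] for r < a, c < b
--     # (rows shorter than w contribute their existing cells only).
--     P = [[0] * (w + 1)]
--     for row in img:
--         prev = P[-1]
--         cur = [0] * (w + 1)
--         s = 0
--         for b in range(w):
--             if b < len(row):
--                 s += row[b]
--             cur[b + 1] = prev[b + 1] + s
--         P.append(cur)
--     r0, r1 = max(0, i - 1), min(h, i + 2)
--     c0, c1 = max(0, j - 1), min(w, j + 2)
--     add = P[r1][c1] - P[r0][c1] - P[r1][c0] + P[r0][c0]
--     return add // ((r1 - r0) * (c1 - c0))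
-- ===== Notes on version B (the rewrite author's own statement) =====
-- stated objective: alternative
-- what changed: B precomputes a 2D integral image (prefix-sum table) in a staged pass and obtains the window sum by a 4-term inclusion-exclusion lookup and the count as the closed-form window area, instead of A's enumeration of the 9 offsets with a per-cell bounds test; Pre_ excludes exactly the inputs where A raises (empty clamped window -> ZeroDivisionError, or a ragged row inside the window shorter than the clamped column bound -> IndexError).
import Mathlib
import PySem

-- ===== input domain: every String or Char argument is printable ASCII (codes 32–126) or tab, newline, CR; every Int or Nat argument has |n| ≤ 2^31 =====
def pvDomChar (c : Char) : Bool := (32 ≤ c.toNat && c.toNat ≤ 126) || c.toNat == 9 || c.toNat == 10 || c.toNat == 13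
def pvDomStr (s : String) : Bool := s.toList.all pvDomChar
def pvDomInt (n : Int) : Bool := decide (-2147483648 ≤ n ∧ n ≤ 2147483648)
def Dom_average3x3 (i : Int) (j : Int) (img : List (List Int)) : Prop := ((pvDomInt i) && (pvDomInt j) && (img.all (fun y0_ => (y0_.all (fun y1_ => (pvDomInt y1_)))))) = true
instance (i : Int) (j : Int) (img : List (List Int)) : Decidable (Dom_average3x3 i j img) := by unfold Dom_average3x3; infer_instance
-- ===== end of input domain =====

-- B precomputes a 2D integral image (prefix-sum table) in a staged pass and answers with a 4-term
-- inclusion-exclusion lookup plus a closed-form count, instead of A's 9-offset enumeration with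
-- per-cell bounds tests; return values only, no mutation.

-- ===== PORT A =====
def average3x3 (i : Int) (j : Int) (img : List (List Int)) : Int :=
  let p := (PySem.List.pyRange (i - 1) (i + 2) 1).foldl (fun (s : Int × Int) a =>
    (PySem.List.pyRange (j - 1) (j + 2) 1).foldl (fun (s : Int × Int) b =>
      if a ≥ 0 ∧ a < (img.length : Int) ∧ b ≥ 0 ∧ b < ((PySem.List.pyGetD img 0 []).length : Int)
      then (s.1 + PySem.List.pyGetD (PySem.List.pyGetD img a []) b 0, s.2 + 1)
      else s) s) ((0 : Int), (0 : Int))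
  PySem.Int.floordiv p.1 p.2

-- ===== PORT B =====
-- inner loop of Source B: cur = [0]*(w+1); s = 0; for b in range(w): if b < len(row): s += row[b];
-- cur[b+1] = prev[b+1] + s  (cur is built left-to-right, which is what the index assignments produce)
def pvRowStep (w : Nat) (prev row : List Int) : List Int :=
  ((List.range w).foldl (fun (sc : Int × List Int) (b : Nat) =>
    let s := if (b : Int) < (row.length : Int) then sc.1 + PySem.List.pyGetD row (b : Int) 0 else sc.1
    (s, sc.2 ++ [PySem.List.pyGetD prev ((b : Int) + 1) 0 + s])) ((0 : Int), [(0 : Int)])).2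

def average3x3_alt (i : Int) (j : Int) (img : List (List Int)) : Int :=
  let h : Int := (img.length : Int)
  -- w = len(img[0]) if img else 0  (pyGetD with default [] yields length 0 on empty img)
  let w : Nat := (PySem.List.pyGetD img 0 []).length
  let P : List (List Int) :=
    (img.foldl (fun (st : List Int × List (List Int)) row =>
      (pvRowStep w st.1 row, st.2 ++ [pvRowStep w st.1 row]))
      (List.replicate (w + 1) 0, [List.replicate (w + 1) 0])).2
  let r0 : Int := max 0 (i - 1)
  let r1 : Int := min h (i + 2)
  let c0 : Int := max 0 (j - 1)
  let c1 : Int := min (w : Int) (j + 2)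
  let pg : Int → Int → Int := fun a b => PySem.List.pyGetD (PySem.List.pyGetD P a []) b 0
  PySem.Int.floordiv (pg r1 c1 - pg r0 c1 - pg r1 c0 + pg r0 c0) ((r1 - r0) * (c1 - c0))

-- ===== PRECONDITION & SPEC =====
-- Pre_ holds exactly when Python A returns: the clamped window is non-empty in both dimensions
-- (otherwise count = 0 and A raises ZeroDivisionError) and every visited row reaches the clamped
-- column bound (otherwise img[a][b] raises IndexError on a ragged row).
def Pre_average3x3 (i : Int) (j : Int) (img : List (List Int)) : Prop :=
  max 0 (i - 1) < min (img.length : Int) (i + 2) ∧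
  max 0 (j - 1) < min ((PySem.List.pyGetD img 0 []).length : Int) (j + 2) ∧
  ∀ a ∈ PySem.List.pyRange (max 0 (i - 1)) (min (img.length : Int) (i + 2)) 1,
    min ((PySem.List.pyGetD img 0 []).length : Int) (j + 2) ≤ ((PySem.List.pyGetD img a []).length : Int)
instance (i : Int) (j : Int) (img : List (List Int)) : Decidable (Pre_average3x3 i j img) := by
  unfold Pre_average3x3; infer_instance

def pvWitness_average3x3 : Int × Int × List (List Int) := (0, 0, [[1, 2], [3, 4]])

def Spec_average3x3 (i : Int) (j : Int) (img : List (List Int)) (out : Int) : Prop := out = average3x3_alt i j img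
instance (i : Int) (j : Int) (img : List (List Int)) (out : Int) : Decidable (Spec_average3x3 i j img out) := by unfold Spec_average3x3; infer_instance

-- ===== CLAIM (what is proved, stated in full; the proofs are below) =====
def Claim_equal_average3x3 : Prop := ∀ (i : Int) (j : Int) (img : List (List Int)), Dom_average3x3 i j img → Pre_average3x3 i j img → Spec_average3x3 i j img (average3x3 i j img)

-- ===== LEMMAS AND PROOFS =====

-- the clamped window of A, as a list of row slices indexed by the in-bounds row indices
def pvWin (i j : Int) (img : List (List Int)) : List (List Int) :=
  (PySem.List.pyRange (max 0 (i - 1)) (min (img.length : Int) (i + 2)) 1).map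
    (fun a => PySem.List.slice (PySem.List.pyGetD img a [])
      (some (max 0 (j - 1))) (some (min ((PySem.List.pyGetD img 0 []).length : Int) (j + 2))))

-- ---- A-side: the double loop with per-cell guard computes the window sums ----

-- fold accumulating a pair of independent sums
lemma foldl_pair_add {α : Type} (L : List α) (f g : α → Int) (s : Int × Int) :
    L.foldl (fun s x => (s.1 + f x, s.2 + g x)) s = (s.1 + (L.map f).sum, s.2 + (L.map g).sum) := by
  induction L generalizing s with
  | nil => simp
  | cons x t ih => simp [ih]; constructor <;> ring

-- guarded pair fold = filtered sums
lemma foldl_pair_add_if {α : Type} (L : List α) (P : α → Prop) [DecidablePred P] (f : α → Int) (s : Int × Int) :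
    L.foldl (fun s x => if P x then (s.1 + f x, s.2 + 1) else s) s
      = (s.1 + ((L.filter (fun x => decide (P x))).map f).sum,
         s.2 + ((L.filter (fun x => decide (P x))).length : Int)) := by
  induction L generalizing s with
  | nil => simp
  | cons x t ih =>
    by_cases h : P x
    · simp [h, ih]; constructor <;> ring
    · simp [h, ih]

-- filtering a unit-step range by an interval clamps its bounds
lemma filter_pyRange_interval (n : Int) (k : Nat) : ∀ (lo hi : Int), (hi - lo).toNat = k →
    (PySem.List.pyRange lo hi 1).filter (fun x => decide (0 ≤ x ∧ x < n))
      = PySem.List.pyRange (max 0 lo) (min n hi) 1 := by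
  induction k with
  | zero =>
    intro lo hi hk
    rw [PySem.List.pyRange_one_eq_nil (by omega), PySem.List.pyRange_one_eq_nil (by omega)]
    simp
  | succ k ih =>
    intro lo hi hk
    rw [PySem.List.pyRange_one_cons (by omega)]
    by_cases hg : 0 ≤ lo ∧ lo < n
    · rw [List.filter_cons_of_pos (by simpa using hg), ih (lo + 1) hi (by omega)]
      have hcons := PySem.List.pyRange_one_cons (show max 0 lo < min n hi by omega)
      have harg : max 0 lo + 1 = max 0 (lo + 1) := by omega
      rw [hcons, ← harg]
      congr 1
      omega
    · rw [List.filter_cons_of_neg (by simpa using hg), ih (lo + 1) hi (by omega)]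
      by_cases h0 : lo < 0
      · congr 1; omega
      · rw [PySem.List.pyRange_one_eq_nil (by omega), PySem.List.pyRange_one_eq_nil (by omega)]

-- reading a range of in-bounds indices is the slice
lemma map_pyGetD_pyRange_slice {α : Type} (xs : List α) (a b : Int) (d : α)
    (ha : 0 ≤ a) (hab : a ≤ b) (hb : b ≤ (xs.length : Int)) :
    (PySem.List.pyRange a b 1).map (fun k => PySem.List.pyGetD xs k d)
      = PySem.List.slice xs (some a) (some b) := by
  have hs : PySem.List.slice xs (some a) (some b)
      = (xs.drop a.toNat).take (b.toNat - a.toNat) :=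
    PySem.List.slice_toNat xs ha (by omega)
  rw [hs, PySem.List.pyRange_one, List.map_map]
  apply List.ext_getElem
  · simp; omega
  · intro k h1 h2
    have hk : k < (b - a).toNat := by simpa using h1
    simp only [List.getElem_map, List.getElem_range, Function.comp_apply,
      List.getElem_take, List.getElem_drop]
    rw [PySem.List.pyGetD_eq_getElem xs d (by omega) (by omega)]
    congr 1
    omega

-- a sum over a list where the function vanishes off a filter
lemma sum_map_filter {α : Type} (L : List α) (F F' : α → Int) (Q : α → Prop) [DecidablePred Q]
    (h0 : ∀ a ∈ L, ¬ Q a → F a = 0) (h1 : ∀ a ∈ L, Q a → F a = F' a) :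
    (L.map F).sum = ((L.filter (fun a => decide (Q a))).map F').sum := by
  induction L with
  | nil => simp
  | cons x t ih =>
    by_cases hq : Q x
    · rw [List.filter_cons_of_pos (by simpa using hq)]
      simp only [List.map_cons, List.sum_cons]
      rw [h1 x (by simp) hq, ih (fun a ha => h0 a (by simp [ha])) (fun a ha => h1 a (by simp [ha]))]
    · rw [List.filter_cons_of_neg (by simpa using hq)]
      simp only [List.map_cons, List.sum_cons]
      rw [h0 x (by simp) hq, ih (fun a ha => h0 a (by simp [ha])) (fun a ha => h1 a (by simp [ha]))]
      ring

-- the a-guard of A's cell test, dropped or collapsed depending on the row index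
lemma filter_guard_drop (a h w : Int) (L : List Int) (hq : 0 ≤ a ∧ a < h) :
    L.filter (fun b => decide (a ≥ 0 ∧ a < h ∧ b ≥ 0 ∧ b < w))
      = L.filter (fun b => decide (0 ≤ b ∧ b < w)) := by
  apply List.filter_congr
  intro b _
  rw [decide_eq_decide]
  constructor
  · rintro ⟨_, _, h3, h4⟩; exact ⟨h3, h4⟩
  · rintro ⟨h3, h4⟩; exact ⟨hq.1, hq.2, h3, h4⟩

lemma filter_guard_nil (a h w : Int) (L : List Int) (hq : ¬ (0 ≤ a ∧ a < h)) :
    L.filter (fun b => decide (a ≥ 0 ∧ a < h ∧ b ≥ 0 ∧ b < w)) = [] := by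
  apply List.filter_eq_nil_iff.mpr
  intro b _
  simp only [decide_eq_true_eq]
  omega

-- A = floordiv of the window sum by the window cell count
lemma A_char (i j : Int) (img : List (List Int)) (hpre : Pre_average3x3 i j img) :
    average3x3 i j img
      = PySem.Int.floordiv ((pvWin i j img).map List.sum).sum
          ((pvWin i j img).map (fun r => (r.length : Int))).sum := by
  obtain ⟨hr, hc, hrow⟩ := hpre
  have hinner : ∀ a ∈ PySem.List.pyRange (max 0 (i - 1)) (min (img.length : Int) (i + 2)) 1,
      PySem.List.slice (PySem.List.pyGetD img a [])
          (some (max 0 (j - 1))) (some (min ((PySem.List.pyGetD img 0 []).length : Int) (j + 2)))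
        = ((PySem.List.pyRange (j - 1) (j + 2) 1).filter
            (fun b => decide (0 ≤ b ∧ b < ((PySem.List.pyGetD img 0 []).length : Int)))).map
            (fun b => PySem.List.pyGetD (PySem.List.pyGetD img a []) b 0) := by
    intro a ha
    rw [filter_pyRange_interval ((PySem.List.pyGetD img 0 []).length : Int) 3 (j - 1) (j + 2) (by omega)]
    exact (map_pyGetD_pyRange_slice _ _ _ 0 (by omega) (by omega) (hrow a ha)).symm
  unfold average3x3 pvWin
  have hfold := fun (a : Int) =>
    foldl_pair_add_if (PySem.List.pyRange (j - 1) (j + 2) 1)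
      (fun b => a ≥ 0 ∧ a < (img.length : Int) ∧ b ≥ 0 ∧ b < ((PySem.List.pyGetD img 0 []).length : Int))
      (fun b => PySem.List.pyGetD (PySem.List.pyGetD img a []) b 0)
  simp only [hfold]
  rw [foldl_pair_add]
  simp only [zero_add, List.map_map]
  congr 1
  · rw [sum_map_filter _ _
        (fun a => (((PySem.List.pyRange (j - 1) (j + 2) 1).filter
            (fun b => decide (0 ≤ b ∧ b < ((PySem.List.pyGetD img 0 []).length : Int)))).map
            (fun b => PySem.List.pyGetD (PySem.List.pyGetD img a []) b 0)).sum)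
        (fun a => 0 ≤ a ∧ a < (img.length : Int))
        (fun a _ hq => by rw [filter_guard_nil _ _ _ _ hq]; simp)
        (fun a _ hq => by rw [filter_guard_drop _ _ _ _ hq])]
    rw [filter_pyRange_interval (img.length : Int) 3 (i - 1) (i + 2) (by omega)]
    refine congrArg List.sum (List.map_congr_left ?_)
    intro a ha
    simp only [Function.comp_apply]
    rw [hinner a ha]
  · rw [sum_map_filter _ _
        (fun a => ((((PySem.List.pyRange (j - 1) (j + 2) 1).filter
            (fun b => decide (0 ≤ b ∧ b < ((PySem.List.pyGetD img 0 []).length : Int)))).length : Int)))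
        (fun a => 0 ≤ a ∧ a < (img.length : Int))
        (fun a _ hq => by rw [filter_guard_nil _ _ _ _ hq]; simp)
        (fun a _ hq => by rw [filter_guard_drop _ _ _ _ hq])]
    rw [filter_pyRange_interval (img.length : Int) 3 (i - 1) (i + 2) (by omega)]
    refine congrArg List.sum (List.map_congr_left ?_)
    intro a ha
    simp only [Function.comp_apply]
    rw [hinner a ha, List.length_map]

-- ---- B-side: the integral image holds the 2D prefix sums ----

-- pvQ img k b = sum of img[r][c] for r < k, c < b (short rows truncated by take)
def pvQ (img : List (List Int)) (k b : Nat) : Int :=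
  ((img.take k).map (fun r => (r.take b).sum)).sum

lemma pvRowStep_aux (prev row : List Int) : ∀ n : Nat,
    ((List.range n).foldl (fun (sc : Int × List Int) (b : Nat) =>
      let s := if (b : Int) < (row.length : Int) then sc.1 + PySem.List.pyGetD row (b : Int) 0 else sc.1
      (s, sc.2 ++ [PySem.List.pyGetD prev ((b : Int) + 1) 0 + s])) ((0 : Int), [(0 : Int)]))
    = ((row.take n).sum,
       0 :: (List.range n).map (fun (b : Nat) => PySem.List.pyGetD prev ((b : Int) + 1) 0 + (row.take (b + 1)).sum)) := by
  intro n
  induction n with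
  | zero => simp
  | succ n ih =>
    rw [List.range_succ, List.foldl_append, ih]
    simp only [List.foldl_cons, List.foldl_nil]
    have hs : (if ((n : Nat) : Int) < (row.length : Int)
          then (row.take n).sum + PySem.List.pyGetD row ((n : Nat) : Int) 0
          else (row.take n).sum) = (row.take (n + 1)).sum := by
      by_cases h : n < row.length
      · rw [if_pos (by exact_mod_cast h), PySem.List.pyGetD_natCast,
          List.getD_eq_getElem row 0 h, List.take_add_one, List.sum_append]
        simp [List.getElem?_eq_getElem h]
      · rw [if_neg (by omega), List.take_of_length_le (by omega),
          List.take_of_length_le (by omega)]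
    simp only [List.map_append, List.map_cons, List.map_nil]
    rw [← hs]
    simp

lemma pvRowStep_char (w : Nat) (prev row : List Int) :
    pvRowStep w prev row
      = 0 :: (List.range w).map (fun (b : Nat) => PySem.List.pyGetD prev ((b : Int) + 1) 0 + (row.take (b + 1)).sum) := by
  unfold pvRowStep
  rw [pvRowStep_aux]

-- the sequence of rows the outer loop appends
def pvRows (w : Nat) : List Int → List (List Int) → List (List Int)
  | _, [] => []
  | prev, r :: rs => pvRowStep w prev r :: pvRows w (pvRowStep w prev r) rs

lemma fold_rows (w : Nat) : ∀ (L : List (List Int)) (st : List Int × List (List Int)),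
    (L.foldl (fun (st : List Int × List (List Int)) row =>
      (pvRowStep w st.1 row, st.2 ++ [pvRowStep w st.1 row])) st).2
      = st.2 ++ pvRows w st.1 L := by
  intro L
  induction L with
  | nil => intro st; simp [pvRows]
  | cons r rs ih =>
    intro st
    simp only [List.foldl_cons]
    rw [ih]
    simp [pvRows]

-- one step of the integral image: prefix-sum row k ↦ prefix-sum row k+1
lemma rowStep_Q (w : Nat) (full : List (List Int)) (k : Nat) (r : List Int)
    (hk : full[k]? = some r) :
    pvRowStep w ((List.range (w + 1)).map (fun b => pvQ full k b)) r
      = (List.range (w + 1)).map (fun b => pvQ full (k + 1) b) := by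
  rw [pvRowStep_char]
  conv_rhs => rw [List.range_succ_eq_map (n := w)]
  simp only [List.map_cons, List.map_map]
  congr 1
  · simp [pvQ]
  · apply List.map_congr_left
    intro b hb
    have hb' : b + 1 < w + 1 := by
      have := List.mem_range.mp hb; omega
    have hc : ((b : Int) + 1) = (((b + 1 : Nat)) : Int) := by push_cast; ring
    rw [hc, PySem.List.pyGetD_natCast, PySem.List.getD_map_range _ _ _ _ hb']
    show pvQ full k (b + 1) + (r.take (b + 1)).sum = pvQ full (k + 1) (b + 1)
    unfold pvQ
    conv_rhs => rw [List.take_add_one]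
    rw [hk]
    simp

-- peeling the first element of a map over range (n+1)
lemma map_range_succ_shift {α : Type} (G : Nat → α) (n : Nat) :
    (List.range (n + 1)).map G = G 0 :: (List.range n).map (fun t => G (t + 1)) := by
  rw [List.range_succ_eq_map, List.map_cons, List.map_map]
  rfl

lemma rows_char (w : Nat) (full : List (List Int)) :
    ∀ (L : List (List Int)) (k : Nat), full.drop k = L →
    pvRows w ((List.range (w + 1)).map (fun b => pvQ full k b)) L
      = (List.range L.length).map (fun t => (List.range (w + 1)).map (fun b => pvQ full (k + 1 + t) b)) := by
  intro L
  induction L with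
  | nil => intro k _; simp [pvRows]
  | cons r rs ih =>
    intro k h
    have hk : full[k]? = some r := by
      have h0 : (full.drop k)[0]? = some r := by rw [h]; rfl
      rw [List.getElem?_drop] at h0
      simpa using h0
    have hdrop : full.drop (k + 1) = rs := by
      have h1 : (full.drop k).drop 1 = rs := by rw [h]; simp
      rwa [List.drop_drop] at h1
    simp only [pvRows]
    rw [rowStep_Q w full k r hk, ih (k + 1) hdrop, List.length_cons,
      map_range_succ_shift (fun t => (List.range (w + 1)).map (fun b => pvQ full (k + 1 + t) b)) rs.length]
    refine congrArg₂ List.cons (by norm_num) ?_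
    apply List.map_congr_left
    intro t _
    have harg : k + 1 + 1 + t = k + 1 + (t + 1) := by omega
    rw [harg]

-- the whole table P, entry by entry
lemma P_char (w : Nat) (img : List (List Int)) :
    List.replicate (w + 1) (0 : Int) :: pvRows w (List.replicate (w + 1) 0) img
      = (List.range (img.length + 1)).map (fun k => (List.range (w + 1)).map (fun b => pvQ img k b)) := by
  have hz : List.replicate (w + 1) (0 : Int) = (List.range (w + 1)).map (fun b => pvQ img 0 b) := by
    simp [pvQ]
  rw [hz, rows_char w img img 0 (by simp),
    map_range_succ_shift (fun k => (List.range (w + 1)).map (fun b => pvQ img k b)) img.length]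
  refine congrArg₂ List.cons rfl ?_
  apply List.map_congr_left
  intro t _
  have harg : 0 + 1 + t = t + 1 := by omega
  rw [harg]

-- reading the table: a double pyGetD on P is pvQ
lemma pg_Q (img : List (List Int)) (w : Nat) (a b : Int)
    (h0 : 0 ≤ a) (h1 : a ≤ (img.length : Int)) (h2 : 0 ≤ b) (h3 : b ≤ (w : Int)) :
    PySem.List.pyGetD (PySem.List.pyGetD
        ((List.range (img.length + 1)).map (fun k => (List.range (w + 1)).map (fun b => pvQ img k b))) a []) b 0
      = pvQ img a.toNat b.toNat := by
  rw [PySem.List.pyGetD_of_nonneg _ _ h0,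
    PySem.List.getD_map_range _ _ _ _ (by omega),
    PySem.List.pyGetD_of_nonneg _ _ h2,
    PySem.List.getD_map_range _ _ _ _ (by omega)]

-- telescoping the first index of pvQ
lemma Q_sub (img : List (List Int)) (b : Nat) (k0 k1 : Nat) (h : k0 ≤ k1) :
    pvQ img k1 b - pvQ img k0 b
      = (((img.drop k0).take (k1 - k0)).map (fun r => (r.take b).sum)).sum := by
  unfold pvQ
  have h2 : img.take k1 = img.take k0 ++ (img.drop k0).take (k1 - k0) := by
    rw [← List.take_add]; congr 1; omega
  rw [h2, List.map_append, List.sum_append]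
  ring

-- a difference of Σ-maps is the Σ-map of differences
lemma sum_map_sub {α : Type} (L : List α) (f g : α → Int) :
    (L.map f).sum - (L.map g).sum = (L.map (fun x => f x - g x)).sum := by
  induction L with
  | nil => simp
  | cons x t ih => simp only [List.map_cons, List.sum_cons]; rw [← ih]; ring

-- a row's prefix-sum difference is the slice sum
lemma row_sub (r : List Int) (c0 c1 : Int) (h0 : 0 ≤ c0) (h1 : c0 ≤ c1) (_h2 : c1 ≤ (r.length : Int)) :
    (r.take c1.toNat).sum - (r.take c0.toNat).sum = (PySem.List.slice r (some c0) (some c1)).sum := by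
  rw [PySem.List.slice_toNat r h0 (by omega)]
  have h3 : r.take c1.toNat = r.take c0.toNat ++ (r.drop c0.toNat).take (c1.toNat - c0.toNat) := by
    rw [← List.take_add]; congr 1; omega
  rw [h3, List.sum_append]
  ring

-- the length of an in-range slice
lemma slice_len (r : List Int) (c0 c1 : Int) (h0 : 0 ≤ c0) (h1 : c0 ≤ c1) (h2 : c1 ≤ (r.length : Int)) :
    ((PySem.List.slice r (some c0) (some c1)).length : Int) = c1 - c0 := by
  rw [PySem.List.slice_toNat r h0 (by omega)]
  simp only [List.length_take, List.length_drop]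
  omega

-- ===== VERDICT (by name: the statement is the Claim_ definition above) =====
theorem average3x3_spec : Claim_equal_average3x3 := by
  intro i j img _ hpre
  obtain ⟨hr, hc, hrow⟩ := hpre
  show average3x3 i j img = average3x3_alt i j img
  rw [A_char i j img ⟨hr, hc, hrow⟩]
  simp only [average3x3_alt]
  rw [fold_rows, List.singleton_append, P_char]
  have hwin : pvWin i j img
      = (PySem.List.pyRange (max 0 (i - 1)) (min (img.length : Int) (i + 2)) 1).map
          (fun a => PySem.List.slice (PySem.List.pyGetD img a [])
            (some (max 0 (j - 1))) (some (min ((PySem.List.pyGetD img 0 []).length : Int) (j + 2)))) := rfl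
  rw [pg_Q img _ _ _ (by omega) (by omega) (by omega) (by omega),
      pg_Q img _ _ _ (by omega) (by omega) (by omega) (by omega),
      pg_Q img _ _ _ (by omega) (by omega) (by omega) (by omega),
      pg_Q img _ _ _ (by omega) (by omega) (by omega) (by omega)]
  refine congrArg₂ PySem.Int.floordiv ?_ ?_
  · -- numerators
    have hregroup :
        pvQ img (min (img.length : Int) (i + 2)).toNat (min ((PySem.List.pyGetD img 0 []).length : Int) (j + 2)).toNat
          - pvQ img (max 0 (i - 1)).toNat (min ((PySem.List.pyGetD img 0 []).length : Int) (j + 2)).toNat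
          - pvQ img (min (img.length : Int) (i + 2)).toNat (max 0 (j - 1)).toNat
          + pvQ img (max 0 (i - 1)).toNat (max 0 (j - 1)).toNat
        = (pvQ img (min (img.length : Int) (i + 2)).toNat (min ((PySem.List.pyGetD img 0 []).length : Int) (j + 2)).toNat
            - pvQ img (max 0 (i - 1)).toNat (min ((PySem.List.pyGetD img 0 []).length : Int) (j + 2)).toNat)
          - (pvQ img (min (img.length : Int) (i + 2)).toNat (max 0 (j - 1)).toNat
            - pvQ img (max 0 (i - 1)).toNat (max 0 (j - 1)).toNat) := by ring
    rw [hregroup,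
      Q_sub img _ (max 0 (i - 1)).toNat (min (img.length : Int) (i + 2)).toNat (by omega),
      Q_sub img _ (max 0 (i - 1)).toNat (min (img.length : Int) (i + 2)).toNat (by omega),
      sum_map_sub]
    have hW : (img.drop (max 0 (i - 1)).toNat).take ((min (img.length : Int) (i + 2)).toNat - (max 0 (i - 1)).toNat)
        = (PySem.List.pyRange (max 0 (i - 1)) (min (img.length : Int) (i + 2)) 1).map
            (fun k => PySem.List.pyGetD img k []) := by
      rw [map_pyGetD_pyRange_slice img _ _ [] (by omega) (by omega) (by omega),
        PySem.List.slice_toNat img (by omega) (by omega)]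
    rw [hW, hwin, List.map_map, List.map_map]
    refine congrArg List.sum (List.map_congr_left ?_)
    intro a ha
    simp only [Function.comp_apply]
    exact (row_sub (PySem.List.pyGetD img a []) _ _ (by omega) (by omega) (hrow a ha)).symm
  · -- denominators
    have hconst : (pvWin i j img).map (fun r => (r.length : Int))
        = (pvWin i j img).map (fun _ => min ((PySem.List.pyGetD img 0 []).length : Int) (j + 2) - max 0 (j - 1)) := by
      apply List.map_congr_left
      intro r hrm
      obtain ⟨a, ha, rfl⟩ := List.mem_map.mp hrm
      exact slice_len (PySem.List.pyGetD img a []) _ _ (by omega) (by omega) (hrow a ha)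
    rw [hconst, PySem.List.sum_map_const_int]
    have hlen : ((pvWin i j img).length : Int) = min (img.length : Int) (i + 2) - max 0 (i - 1) := by
      unfold pvWin
      rw [List.length_map, PySem.List.length_pyRange_one]
      omega
    rw [hlen]
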